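-- pv_equiv track=rewrite | github.com/xiemotongye/AnswerHelper | solve_utils.py | find_min_index2
-- ===== SOURCE A (Python) =====
-- def find_min_index(counts):
--     return counts.index(min(counts))
--
-- def find_min_index2(counts, counts2):
--     the_min = min(counts)
--     #如果有多个相同的最大值，传入这几个最大值对应的第二组参数
--     min_list = []
--     #第二组参数的原始index
--     min_index_list = []
--
--     index = 0
--     for count in counts:
--         if count == the_min:
--             min_list.append(counts2[index])
--             min_index_list.append(index)
--         index += 1
--
--     if len(min_list) > 1:
--         second_index = find_min_index(min_list)
--         return min_index_list[second_index]
--     else :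
--         return counts.index(min(counts))
-- ===== SOURCE B (Python) =====
-- def find_min_index2(counts, counts2):
--     # Single left-to-right pass with a running accumulator (best index, best count,
--     # lazily fetched tie-break key); the key from counts2 is only consulted on ties.
--     best = None  # (index, count, key-from-counts2 or None if never needed yet)
--     for i, c in enumerate(counts):
--         if best is None or c < best[1]:
--             best = (i, c, None)
--         elif c == best[1]:
--             bk = best[2] if best[2] is not None else counts2[best[0]]
--             k = counts2[i]
--             best = (i, c, k) if k < bk else (best[0], c, bk)
--     return best[0] if best is not None else None
-- ===== Notes on version B (the rewrite author's own statement) =====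
-- stated objective: alternative
-- what changed: Replaces A's staged passes (global min, then two parallel accumulator lists, then a nested argmin and .index calls) by one left-to-right pass keeping a running (best index, best count, lazily fetched counts2 key) accumulator; counts2 is only read on ties of the running minimum.
import Mathlib
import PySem

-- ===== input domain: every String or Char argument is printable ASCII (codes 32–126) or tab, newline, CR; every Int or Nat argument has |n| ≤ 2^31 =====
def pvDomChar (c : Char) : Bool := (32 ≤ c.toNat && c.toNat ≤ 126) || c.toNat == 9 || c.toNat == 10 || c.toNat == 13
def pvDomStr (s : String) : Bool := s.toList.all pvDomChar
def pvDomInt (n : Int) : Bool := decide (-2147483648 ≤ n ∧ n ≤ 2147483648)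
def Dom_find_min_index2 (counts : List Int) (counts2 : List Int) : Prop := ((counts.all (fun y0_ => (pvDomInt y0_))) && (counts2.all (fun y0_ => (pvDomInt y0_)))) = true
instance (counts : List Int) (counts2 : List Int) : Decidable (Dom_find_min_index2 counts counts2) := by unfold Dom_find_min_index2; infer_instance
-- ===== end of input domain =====

-- B replaces A's staged passes (global min, parallel accumulator lists, nested argmin, .index)
-- by one left-to-right pass with a running (best index, best count, lazy counts2 key) accumulator
-- (objective: alternative).


-- ===== PORT A =====
-- helper find_min_index: counts.index(min(counts)); min() raises on [] → -1 is unreachable under Pre_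
def find_min_index_helper (counts : List Int) : Int :=
  match PySem.List.min? counts (fun x => x) with
  | none => -1
  | some m =>
    match PySem.List.index? counts m with
    | none => -1
    | some k => (k : Int)

def find_min_index2 (counts : List Int) (counts2 : List Int) : Int :=
  match PySem.List.min? counts (fun x => x) with
  | none => -1  -- Python: min([]) raises ValueError; excluded by Pre_
  | some the_min =>
    -- the loop: state = (min_list, min_index_list, index)
    let st := counts.foldl
      (fun (s : List Int × List Int × Int) count =>
        if count = the_min then
          (s.1 ++ [PySem.List.pyGetD counts2 s.2.2 0], s.2.1 ++ [s.2.2], s.2.2 + 1)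
        else (s.1, s.2.1, s.2.2 + 1))
      ([], [], 0)
    if 1 < st.1.length then
      PySem.List.pyGetD st.2.1 (find_min_index_helper st.1) 0
    else
      -- counts.index(min(counts))
      match PySem.List.min? counts (fun x => x) with
      | none => -1
      | some m2 =>
        match PySem.List.index? counts m2 with
        | none => -1
        | some k => (k : Int)

-- ===== PORT B =====
-- the loop body of Source B: state `best` is None or (best index, best count, key or None)
def pvStepB (counts2 : List Int) (best : Option (Int × Int × Option Int)) (p : Int × Int) :
    Option (Int × Int × Option Int) :=
  match best with
  | none => some (p.1, p.2, none)
  | some (bi, bc, bk) =>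
    if p.2 < bc then some (p.1, p.2, none)
    else if p.2 = bc then
      let bk' := bk.getD (PySem.List.pyGetD counts2 bi 0)
      let k := PySem.List.pyGetD counts2 p.1 0
      if k < bk' then some (p.1, bc, some k) else some (bi, bc, some bk')
    else some (bi, bc, bk)

def find_min_index2_alt (counts : List Int) (counts2 : List Int) : Int :=
  match (PySem.List.enumerate counts 0).foldl (pvStepB counts2) none with
  | none => -1  -- Python Source B returns None here (empty counts); excluded by Pre_
  | some b => b.1

-- ===== PRECONDITION & SPEC =====
-- Pre_ excludes exactly the inputs where the Python A raises: empty counts (ValueError from min)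
-- and inputs where some position of the minimum of counts is out of range for counts2 (IndexError).
def Pre_find_min_index2 (counts : List Int) (counts2 : List Int) : Prop :=
  counts ≠ [] ∧
  ∀ p ∈ PySem.List.enumerate counts 0, (∀ y ∈ counts, p.2 ≤ y) → p.1 < (counts2.length : Int)
instance (counts : List Int) (counts2 : List Int) : Decidable (Pre_find_min_index2 counts counts2) := by
  unfold Pre_find_min_index2; infer_instance

def pvWitness_find_min_index2 : List Int × List Int := ([3, 1, 2, 1], [5, 9, 7, 0])

def Spec_find_min_index2 (counts : List Int) (counts2 : List Int) (out : Int) : Prop := out = find_min_index2_alt counts counts2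
instance (counts : List Int) (counts2 : List Int) (out : Int) : Decidable (Spec_find_min_index2 counts counts2 out) := by unfold Spec_find_min_index2; infer_instance

-- ===== CLAIM (what is proved, stated in full; the proofs are below) =====
def Claim_equal_find_min_index2 : Prop := ∀ (counts : List Int) (counts2 : List Int), Dom_find_min_index2 counts counts2 → Pre_find_min_index2 counts counts2 → Spec_find_min_index2 counts counts2 (find_min_index2 counts counts2)

-- ===== LEMMAS AND PROOFS =====

-- running minimum with key f, seeded with a (the `some` phase of PySem.List.min?)
def pvFm (f : Int → Int) (a : Int) (xs : List Int) : Int :=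
  xs.foldl (fun m x => if f x < f m then x else m) a

-- the indices (from start s) at which cs carries the value m
def pvIdxs (cs : List Int) (m : Int) (s : Int) : List Int :=
  ((PySem.List.enumerate cs s).filter (fun p => p.2 == m)).map (fun p => p.1)

-- proof-side characterisation both ports are reduced to:
-- argmin (first minimal, keyed by counts2) over the positions of the minimum of counts
def pvC (counts : List Int) (counts2 : List Int) : Int :=
  match PySem.List.min? counts (fun x => x) with
  | none => -1
  | some m =>
    match PySem.List.min? (pvIdxs counts m 0) (fun i => PySem.List.pyGetD counts2 i 0) with
    | none => -1
    | some i => i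

lemma pvMin?_cons (f : Int → Int) (xs : List Int) : ∀ (x : Int),
    PySem.List.min? (x :: xs) f = some (pvFm f x xs) := by
  induction xs with
  | nil => intro x; rfl
  | cons y ys ih =>
    intro x
    by_cases h : f y < f x
    · have h1 : PySem.List.min? (x :: y :: ys) f = PySem.List.min? (y :: ys) f := by
        simp [PySem.List.min?, h]
      rw [h1, ih y]
      simp [pvFm, h]
    · have h1 : PySem.List.min? (x :: y :: ys) f = PySem.List.min? (x :: ys) f := by
        simp [PySem.List.min?, h]
      rw [h1, ih x]
      simp [pvFm, h]

-- pvFm is the FIRST minimum of a :: xs: it splits the list at the first position of minimal key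
lemma pvFm_char (f : Int → Int) (a : Int) (xs : List Int) :
    ∃ p s, a :: xs = p ++ pvFm f a xs :: s ∧
      (∀ y ∈ p, f (pvFm f a xs) < f y) ∧
      (∀ y ∈ a :: xs, f (pvFm f a xs) ≤ f y) := by
  induction xs generalizing a with
  | nil => exact ⟨[], [], by simp [pvFm], by simp, by simp [pvFm]⟩
  | cons x xs ih =>
    have hstep : pvFm f a (x :: xs) = pvFm f (if f x < f a then x else a) xs := by
      simp [pvFm]
    by_cases h : f x < f a
    · obtain ⟨p, s, hsplit, hp, hall⟩ := ih x
      rw [hstep, if_pos h]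
      refine ⟨a :: p, s, by rw [List.cons_append, ← hsplit], ?_, ?_⟩
      · intro y hy
        rcases List.mem_cons.mp hy with rfl | hy
        · exact lt_of_le_of_lt (hall x (by simp)) h
        · exact hp y hy
      · intro y hy
        rcases List.mem_cons.mp hy with rfl | hy
        · exact le_of_lt (lt_of_le_of_lt (hall x (by simp)) h)
        · exact hall y hy
    · obtain ⟨p, s, hsplit, hp, hall⟩ := ih a
      rw [hstep, if_neg h]
      rcases p with _ | ⟨p0, p'⟩
      · simp only [List.nil_append] at hsplit
        have ha : pvFm f a xs = a := (List.cons.injEq .. ▸ hsplit).1.symm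
        have hxs : xs = s := (List.cons.injEq .. ▸ hsplit).2
        refine ⟨[], x :: xs, by simp [ha], by simp, ?_⟩
        intro y hy
        rcases List.mem_cons.mp hy with rfl | hy
        · exact hall y (by simp)
        · rcases List.mem_cons.mp hy with rfl | hy
          · rw [ha]; exact le_of_not_gt h
          · exact hall y (by simp [hy])
      · rw [List.cons_append] at hsplit
        have ha : a = p0 := (List.cons.injEq .. ▸ hsplit).1
        have hxs : xs = p' ++ pvFm f a xs :: s := (List.cons.injEq .. ▸ hsplit).2
        have hba : f (pvFm f a xs) < f a := ha ▸ hp p0 (by simp)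
        refine ⟨a :: x :: p', s, by rw [List.cons_append, List.cons_append, ← hxs], ?_, ?_⟩
        · intro y hy
          rcases List.mem_cons.mp hy with rfl | hy
          · exact hba
          · rcases List.mem_cons.mp hy with rfl | hy
            · exact lt_of_lt_of_le hba (le_of_not_gt h)
            · exact hp y (by simp [hy])
        · intro y hy
          rcases List.mem_cons.mp hy with rfl | hy
          · exact hall y (by simp)
          · rcases List.mem_cons.mp hy with rfl | hy
            · exact le_of_lt (lt_of_lt_of_le hba (le_of_not_gt h))
            · exact hall y (by simp [hy])

-- the element at the split point, as a getElem?
lemma pvSplit_getElem? (l p s : List Int) (b : Int) (h : l = p ++ b :: s) :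
    l[p.length]? = some b := by
  subst h
  rw [List.getElem?_append_right (le_refl p.length)]
  simp

-- first-argmin split is unique
lemma pvFirstMin_unique (f : Int → Int) (l p1 s1 p2 s2 : List Int) (b1 b2 : Int)
    (h1 : l = p1 ++ b1 :: s1) (hp1 : ∀ y ∈ p1, f b1 < f y) (hall1 : ∀ y ∈ l, f b1 ≤ f y)
    (h2 : l = p2 ++ b2 :: s2) (hp2 : ∀ y ∈ p2, f b2 < f y) (hall2 : ∀ y ∈ l, f b2 ≤ f y) :
    p1.length = p2.length ∧ b1 = b2 := by
  have g1 : l[p1.length]? = some b1 := pvSplit_getElem? l p1 s1 b1 h1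
  have g2 : l[p2.length]? = some b2 := pvSplit_getElem? l p2 s2 b2 h2
  rcases Nat.lt_trichotomy p1.length p2.length with hlt | heq | hgt
  · exfalso
    have hb1 : b1 ∈ p2 := by
      have hpe : p2[p1.length]? = some b1 := by
        rw [← List.getElem?_append_left (l₂ := b2 :: s2) hlt, ← h2]; exact g1
      exact List.mem_of_getElem? hpe
    have hb2 : b2 ∈ l := by rw [h2]; simp
    exact lt_irrefl (f b2) (lt_of_lt_of_le (hp2 b1 hb1) (hall1 b2 hb2))
  · refine ⟨heq, ?_⟩
    rw [heq, g2] at g1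
    exact (Option.some_inj.mp g1).symm
  · exfalso
    have hb2 : b2 ∈ p1 := by
      have hpe : p1[p2.length]? = some b2 := by
        rw [← List.getElem?_append_left (l₂ := b1 :: s1) hgt, ← h1]; exact g2
      exact List.mem_of_getElem? hpe
    have hb1 : b1 ∈ l := by rw [h1]; simp
    exact lt_irrefl (f b1) (lt_of_lt_of_le (hp1 b2 hb2) (hall2 b1 hb1))

-- A's loop state in closed form: min_list = keys of the candidates, min_index_list = the candidates
lemma pvFold (counts2 : List Int) (m : Int) : ∀ (cs ml il : List Int) (s : Int),
    cs.foldl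
      (fun (st : List Int × List Int × Int) count =>
        if count = m then
          (st.1 ++ [PySem.List.pyGetD counts2 st.2.2 0], st.2.1 ++ [st.2.2], st.2.2 + 1)
        else (st.1, st.2.1, st.2.2 + 1))
      (ml, il, s)
    = (ml ++ (pvIdxs cs m s).map (fun i => PySem.List.pyGetD counts2 i 0),
       il ++ pvIdxs cs m s, s + cs.length) := by
  intro cs
  induction cs with
  | nil => intro ml il s; simp [pvIdxs, PySem.List.enumerate_nil]
  | cons c cs ih =>
    intro ml il s
    rw [List.foldl_cons]
    by_cases hc : c = m
    · rw [if_pos hc, ih]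
      simp [pvIdxs, PySem.List.enumerate_cons, hc]
      omega
    · rw [if_neg hc, ih]
      simp [pvIdxs, PySem.List.enumerate_cons, hc]
      omega

-- the candidate list is nonempty when m occurs in cs
lemma pvIdxs_ne_nil (cs : List Int) (m : Int) (s : Int) (h : m ∈ cs) :
    pvIdxs cs m s ≠ [] := by
  obtain ⟨k, hk, he⟩ := List.getElem_of_mem h
  have hmem : ((s + (k : Int), m) : Int × Int) ∈ PySem.List.enumerate cs s := by
    rw [PySem.List.mem_enumerate_iff]; exact ⟨k, hk, by rw [he]⟩
  intro hnil
  have hin : (s + (k : Int)) ∈ pvIdxs cs m s :=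
    List.mem_map.mpr ⟨_, List.mem_filter.mpr ⟨hmem, by simp⟩, rfl⟩
  simp [hnil] at hin

-- the head of the candidate list is s + cs.index(m)
lemma pvIdxs_head (m : Int) : ∀ (cs : List Int) (s : Int) (i0 : Int) (tl : List Int),
    pvIdxs cs m s = i0 :: tl → ∃ k : Nat, PySem.List.index? cs m = some k ∧ i0 = s + k := by
  intro cs
  induction cs with
  | nil => intro s i0 tl h; simp [pvIdxs, PySem.List.enumerate_nil] at h
  | cons c cs ih =>
    intro s i0 tl h
    by_cases hc : c = m
    · subst hc
      refine ⟨0, PySem.List.index?_cons_self c cs, ?_⟩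
      unfold pvIdxs at h
      rw [PySem.List.enumerate_cons] at h
      simp at h
      omega
    · have h' : pvIdxs cs m (s + 1) = i0 :: tl := by
        unfold pvIdxs at h ⊢
        rw [PySem.List.enumerate_cons] at h
        simpa [hc] using h
      obtain ⟨k, hk, hi0⟩ := ih (s + 1) i0 tl h'
      refine ⟨k + 1, ?_, by omega⟩
      rw [PySem.List.index?_cons_of_ne cs hc, hk]
      rfl

-- ======== A = pvC ========
lemma pvA_eq_pvC (counts : List Int) (counts2 : List Int) :
    find_min_index2 counts counts2 = pvC counts counts2 := by
  rcases counts with _ | ⟨c0, ct⟩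
  · rfl
  · have hmin : PySem.List.min? (c0 :: ct) (fun x => x) = some (pvFm (fun x => x) c0 ct) :=
      pvMin?_cons (fun x => x) ct c0
    set m := pvFm (fun x => x) c0 ct with hm
    set keyf := fun i => PySem.List.pyGetD counts2 i 0 with hkeyf
    have hLne : pvIdxs (c0 :: ct) m 0 ≠ [] :=
      pvIdxs_ne_nil (c0 :: ct) m 0 (PySem.List.min?_mem hmin)
    rcases hL : pvIdxs (c0 :: ct) m 0 with _ | ⟨i0, lt⟩
    · exact absurd hL hLne
    -- pvC's value
    have hB : pvC (c0 :: ct) counts2 = pvFm keyf i0 lt := by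
      simp only [pvC, hmin]
      rw [hL, pvMin?_cons keyf lt i0]
    -- A's loop state
    have hA0 : find_min_index2 (c0 :: ct) counts2 =
        (if 1 < ((i0 :: lt).map keyf).length then
          PySem.List.pyGetD (i0 :: lt) (find_min_index_helper ((i0 :: lt).map keyf)) 0
        else
          match PySem.List.index? (c0 :: ct) m with
          | none => -1
          | some k => (k : Int)) := by
      simp only [find_min_index2, hmin]
      rw [pvFold counts2 m (c0 :: ct) [] [] 0, hL]
      simp only [List.nil_append]
      rfl
    rw [hA0, hB]
    by_cases hlen : 1 < ((i0 :: lt).map keyf).length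
    · rw [if_pos hlen]
      set ml := (i0 :: lt).map keyf with hml
      have hmlc : ml = keyf i0 :: lt.map keyf := by rw [hml, List.map_cons]
      have hvmin : PySem.List.min? ml (fun x => x) =
          some (pvFm (fun x => x) (keyf i0) (lt.map keyf)) := by
        rw [hmlc]; exact pvMin?_cons (fun x => x) (lt.map keyf) (keyf i0)
      set v := pvFm (fun x => x) (keyf i0) (lt.map keyf) with hv
      have hvmem : v ∈ ml := PySem.List.min?_mem hvmin
      obtain ⟨k, hk⟩ := Option.isSome_iff_exists.mp
        ((PySem.List.index?_isSome_iff ml v).mpr hvmem)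
      have hhelper : find_min_index_helper ml = (k : Int) := by
        simp only [find_min_index_helper, hvmin, hk]
      obtain ⟨hklt, hmk, hne⟩ := PySem.List.getElem_of_index?_eq_some hk
      obtain ⟨q, t, hsplit, hq, hallv⟩ := pvFm_char (fun x => x) (keyf i0) (lt.map keyf)
      rw [← hv] at hsplit hq hallv
      rw [← hmlc] at hsplit hallv
      have hsplitA : ml = ml.take k ++ v :: ml.drop (k + 1) := by
        conv_lhs => rw [← List.take_append_drop k ml]
        rw [List.drop_eq_getElem_cons hklt, hmk]
      have hqA : ∀ y ∈ ml.take k, v < y := by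
        intro y hy
        obtain ⟨j, hj, rfl⟩ := List.mem_iff_getElem.mp hy
        have hjk : j < k := by
          have hj' := hj
          rw [List.length_take] at hj'
          omega
        have hyml : (ml.take k)[j] ∈ ml := List.mem_of_mem_take (List.getElem_mem hj)
        have hle : v ≤ (ml.take k)[j] := hallv _ hyml
        have hneq : (ml.take k)[j] ≠ v := by
          rw [List.getElem_take]
          exact hne j hjk
        exact lt_of_le_of_ne hle (Ne.symm hneq)
      obtain ⟨p, s', hsplitB, hpB, hallB⟩ := pvFm_char keyf i0 lt
      set b := pvFm keyf i0 lt with hb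
      have hsplitBml : ml = p.map keyf ++ keyf b :: s'.map keyf := by
        rw [hml, hsplitB, List.map_append, List.map_cons]
      have hqBml : ∀ y ∈ p.map keyf, keyf b < y := by
        intro y hy; obtain ⟨z, hz, rfl⟩ := List.mem_map.mp hy; exact hpB z hz
      have hallBml : ∀ y ∈ ml, keyf b ≤ y := by
        intro y hy
        rw [hml] at hy
        obtain ⟨z, hz, rfl⟩ := List.mem_map.mp hy
        exact hallB z (hsplitB ▸ hz)
      obtain ⟨hlenEq, hvb⟩ := pvFirstMin_unique (fun x => x) ml (ml.take k) (ml.drop (k + 1))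
        (p.map keyf) (s'.map keyf) v (keyf b) hsplitA hqA hallv hsplitBml hqBml hallBml
      have hkp : k = p.length := by
        have h1 : (ml.take k).length = k := by rw [List.length_take]; omega
        have h2 : (p.map keyf).length = p.length := by simp
        omega
      rw [hhelper, PySem.List.pyGetD_natCast, List.getD_eq_getElem?_getD, hkp]
      have : (i0 :: lt)[p.length]? = some b := pvSplit_getElem? (i0 :: lt) p s' b hsplitB
      rw [this]
      rfl
    · rw [if_neg hlen]
      have hlt : lt = [] := by
        rw [List.length_map, List.length_cons] at hlen
        have : lt.length = 0 := by omega
        exact List.eq_nil_of_length_eq_zero this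
      subst hlt
      obtain ⟨k, hk, hi0⟩ := pvIdxs_head m (c0 :: ct) 0 i0 [] hL
      rw [hk]
      simp [pvFm, hi0]

-- ======== B = pvC ========

-- the running minimum of a nonempty list (what Python's min computes)
def pvMn (cs : List Int) : Int :=
  match cs with
  | [] => 0
  | c :: t => pvFm (fun x => x) c t

lemma pvMin?_eq_pvMn (cs : List Int) (h : cs ≠ []) :
    PySem.List.min? cs (fun x => x) = some (pvMn cs) := by
  rcases cs with _ | ⟨c, t⟩
  · exact absurd rfl h
  · exact pvMin?_cons (fun x => x) t c

lemma pvFm_snoc (f : Int → Int) (a : Int) (xs : List Int) (y : Int) :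
    pvFm f a (xs ++ [y]) = if f y < f (pvFm f a xs) then y else pvFm f a xs := by
  simp [pvFm, List.foldl_append]

lemma pvMn_snoc (cs : List Int) (c : Int) (h : cs ≠ []) :
    pvMn (cs ++ [c]) = if c < pvMn cs then c else pvMn cs := by
  rcases cs with _ | ⟨c0, ct⟩
  · exact absurd rfl h
  · rw [List.cons_append]
    exact pvFm_snoc (fun x => x) c0 ct c

lemma pvMn_le (cs : List Int) (h : cs ≠ []) : ∀ y ∈ cs, pvMn cs ≤ y := by
  rcases cs with _ | ⟨c0, ct⟩
  · exact absurd rfl h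
  · obtain ⟨p, s, _, _, hall⟩ := pvFm_char (fun x => x) c0 ct
    exact hall

lemma pvIdxs_snoc (cs : List Int) (c m : Int) (s : Int) :
    pvIdxs (cs ++ [c]) m s =
      pvIdxs cs m s ++ (if c = m then [s + (cs.length : Int)] else []) := by
  unfold pvIdxs
  rw [PySem.List.enumerate_append, List.filter_append, List.map_append]
  congr 1
  rw [PySem.List.enumerate_cons, PySem.List.enumerate_nil]
  by_cases hc : c = m <;> simp [hc]

lemma pvIdxs_nil_of_lt (cs : List Int) (c : Int) (s : Int) (h : ∀ y ∈ cs, c < y) :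
    pvIdxs cs c s = [] := by
  unfold pvIdxs
  rw [List.map_eq_nil_iff, List.filter_eq_nil_iff]
  intro p hp
  obtain ⟨k, hk, rfl⟩ := (PySem.List.mem_enumerate_iff _ _ _).mp hp
  have := h cs[k] (List.getElem_mem hk)
  simp only [beq_iff_eq]
  omega

-- the single-pass fold of B, characterised: after the whole list, the state carries
-- the first key-minimal position of the minimum, the minimum, and the key if ties were seen
lemma pvFoldB (counts2 : List Int) (cs : List Int) (h : cs ≠ []) :
    ∃ i0 lt, pvIdxs cs (pvMn cs) 0 = i0 :: lt ∧
      (PySem.List.enumerate cs 0).foldl (pvStepB counts2) none =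
        some (pvFm (fun i => PySem.List.pyGetD counts2 i 0) i0 lt, pvMn cs,
          if lt.isEmpty then none
          else some (PySem.List.pyGetD counts2 (pvFm (fun i => PySem.List.pyGetD counts2 i 0) i0 lt) 0)) := by
  induction cs using List.reverseRecOn with
  | nil => exact absurd rfl h
  | append_singleton cs c ih =>
    rw [PySem.List.enumerate_append, List.foldl_append, PySem.List.enumerate_cons,
      PySem.List.enumerate_nil]
    rcases eq_or_ne cs [] with rfl | hcs
    · refine ⟨0, [], ?_, ?_⟩
      · simp [pvIdxs, PySem.List.enumerate_cons, PySem.List.enumerate_nil, pvMn, pvFm]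
      · simp [pvStepB, pvMn, pvFm]
    · obtain ⟨i0, lt, hL, hF⟩ := ih hcs
      rw [hF]
      set m := pvMn cs with hm
      rcases lt_trichotomy c m with hcm | hcm | hcm
      -- new strict minimum
      · have hmn : pvMn (cs ++ [c]) = c := by rw [pvMn_snoc cs c hcs, if_pos hcm]
        refine ⟨0 + (cs.length : Int), [], ?_, ?_⟩
        · rw [hmn, pvIdxs_snoc, if_pos rfl,
            pvIdxs_nil_of_lt cs c 0 (fun y hy => lt_of_lt_of_le hcm (pvMn_le cs hcs y hy))]
          rfl
        · simp only [List.foldl_cons, List.foldl_nil, pvStepB, if_pos hcm, hmn]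
          simp [pvFm]
      -- tie with the running minimum
      · have hmn : pvMn (cs ++ [c]) = m := by
          rw [pvMn_snoc cs c hcs, if_neg (by omega)]
        refine ⟨i0, lt ++ [0 + (cs.length : Int)], ?_, ?_⟩
        · rw [hmn, pvIdxs_snoc, if_pos hcm, hL]; rfl
        · simp only [List.foldl_cons, List.foldl_nil, pvStepB, if_neg (show ¬ c < m by omega),
            if_pos hcm, hmn]
          have hgd : (if lt.isEmpty = true then (none : Option Int)
                else some (PySem.List.pyGetD counts2
                  (pvFm (fun i => PySem.List.pyGetD counts2 i 0) i0 lt) 0)).getD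
              (PySem.List.pyGetD counts2 (pvFm (fun i => PySem.List.pyGetD counts2 i 0) i0 lt) 0)
              = PySem.List.pyGetD counts2 (pvFm (fun i => PySem.List.pyGetD counts2 i 0) i0 lt) 0 := by
            rcases lt with _ | ⟨x, xs⟩ <;> simp
          rw [hgd, pvFm_snoc,
            if_neg (by simp : ¬ (lt ++ [0 + (cs.length : Int)]).isEmpty = true)]
          split_ifs with hk <;>
            simp [PySem.List.pyGetD_natCast, List.getD_eq_getElem?_getD]
      -- larger than the running minimum: state unchanged
      · have hmn : pvMn (cs ++ [c]) = m := by
          rw [pvMn_snoc cs c hcs, if_neg (by omega)]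
        refine ⟨i0, lt, ?_, ?_⟩
        · rw [hmn, pvIdxs_snoc, if_neg (by omega), List.append_nil, hL]
        · simp only [List.foldl_cons, List.foldl_nil, pvStepB,
            if_neg (show ¬ c < m by omega), if_neg (show ¬ c = m by omega), hmn]

lemma pvB_eq_pvC (counts : List Int) (counts2 : List Int) :
    find_min_index2_alt counts counts2 = pvC counts counts2 := by
  rcases eq_or_ne counts [] with rfl | h
  · rfl
  · obtain ⟨i0, lt, hL, hF⟩ := pvFoldB counts2 counts h
    have hC : pvC counts counts2 = pvFm (fun i => PySem.List.pyGetD counts2 i 0) i0 lt := by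
      simp only [pvC, pvMin?_eq_pvMn counts h]
      rw [hL, pvMin?_cons]
    rw [hC]
    simp only [find_min_index2_alt, hF]

-- ===== VERDICT (by name: the statement is the Claim_ definition above) =====
theorem find_min_index2_spec : Claim_equal_find_min_index2 := by
  intro counts counts2 _ _
  unfold Spec_find_min_index2
  rw [pvA_eq_pvC, pvB_eq_pvC]
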